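-- pv_equiv track=rewrite | github.com/kushalmehta2004/Scout | backend/scrapers/base.py | is_senior_role
-- ===== SOURCE A (Python) =====
-- def is_senior_role(title: str) -> bool:
--     """Return True if the title suggests a senior, staff, or lead position."""
--     t = title.lower()
--     # Negative keywords that imply high experience
--     senior_keywords = [
--         "senior",
--         "sr.",
--         "sr ",
--         "staff",
--         "principal",
--         "lead",
--         "manager",
--         "director",
--         "vp",
--         "architect",
--         "expert",
--         "head of",
--         "chief",
--         "senior scientist",
--         "staff scientist",
--     ]
--     for kw in senior_keywords:
--         if kw in t:
--             return True
--     return False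
-- ===== SOURCE B (Python) =====
-- # Keywords whose presence (in the lowered title) marks a senior role.
-- # "senior scientist" and "staff scientist" are redundant (they contain
-- # "senior" / "staff") and can never change the answer, so they are dropped.
-- _KWS = ["senior", "sr.", "sr ", "staff", "principal", "lead", "manager",
--         "director", "vp", "architect", "expert", "head of", "chief"]
--
--
-- def _step(ch, cands):
--     """Advance every candidate suffix by one character; report completions."""
--     hit = False
--     nxt = []
--     for s in cands:
--         if s[0] == ch:
--             if len(s) == 1:
--                 hit = True
--             else:
--                 nxt.append(s[1:])
--     return hit, nxt
--
--
-- def is_senior_role(title: str) -> bool: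
--     """Return True if the title suggests a senior, staff, or lead position."""
--     t = title.lower()
--     # NFA-style single pass: 'active' holds the remaining suffixes of keywords
--     # whose beginnings match the text ending at the current position.
--     active = []
--     for ch in t:
--         hit, active = _step(ch, _KWS + active)
--         if hit:
--             return True
--     return False
-- ===== Notes on version B (the rewrite author's own statement) =====
-- stated objective: alternative
-- what changed: B replaces A's keyword-by-keyword substring-membership tests with a single left-to-right NFA-style scan that maintains an accumulator of active partial matches (remaining keyword suffixes), advancing all keywords simultaneously instead of one full-text search per keyword; the two redundant multi-word keywords are dropped.
import Mathlib
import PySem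

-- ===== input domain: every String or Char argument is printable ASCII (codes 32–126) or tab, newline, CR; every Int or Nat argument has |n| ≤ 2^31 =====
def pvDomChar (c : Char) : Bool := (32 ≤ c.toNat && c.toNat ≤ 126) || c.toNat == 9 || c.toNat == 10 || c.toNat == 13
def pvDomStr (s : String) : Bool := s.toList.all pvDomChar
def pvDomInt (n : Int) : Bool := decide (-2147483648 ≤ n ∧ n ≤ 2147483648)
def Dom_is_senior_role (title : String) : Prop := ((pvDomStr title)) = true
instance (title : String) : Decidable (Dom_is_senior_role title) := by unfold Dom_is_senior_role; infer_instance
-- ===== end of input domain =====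

-- B replaces A's keyword-by-keyword substring tests with a single left-to-right
-- NFA-style scan maintaining the set of active partial matches (keyword
-- suffixes), over a keyword set with the two redundant entries dropped;
-- objective: alternative.

-- ===== PORT A =====
def pvKwA : List String :=
  ["senior", "sr.", "sr ", "staff", "principal", "lead", "manager",
   "director", "vp", "architect", "expert", "head of", "chief",
   "senior scientist", "staff scientist"]

def pvLoopA (t : String) : List String → Bool
  | [] => false
  | kw :: rest => if PySem.Str.isIn kw t then true else pvLoopA t rest

def is_senior_role (title : String) : Bool :=
  pvLoopA (PySem.Str.lower title) pvKwA

-- ===== PORT B =====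
def pvKwB : List (List Char) :=
  ["senior".toList, "sr.".toList, "sr ".toList, "staff".toList,
   "principal".toList, "lead".toList, "manager".toList, "director".toList,
   "vp".toList, "architect".toList, "expert".toList, "head of".toList,
   "chief".toList]

-- _step of Source B: advance every candidate suffix by one character.
-- (Source B's s[0] is only reached on nonempty candidates; the [] case is inert.)
def pvStepB (ch : Char) : List (List Char) → Bool × List (List Char)
  | [] => (false, [])
  | [] :: rest => pvStepB ch rest
  | (c0 :: d) :: rest =>
      match pvStepB ch rest with
      | (hit, nxt) =>
        if c0 == ch then
          (if d.isEmpty then (true, nxt) else (hit, d :: nxt))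
        else (hit, nxt)

-- the for-ch loop of Source B, with the active partial matches as accumulator
def pvRunB : List Char → List (List Char) → Bool
  | [], _ => false
  | ch :: rest, active =>
      match pvStepB ch (pvKwB ++ active) with
      | (hit, nxt) => if hit then true else pvRunB rest nxt

def is_senior_role_alt (title : String) : Bool :=
  pvRunB (PySem.Chars.lower title.toList) []

-- ===== PRECONDITION & SPEC =====
def Spec_is_senior_role (title : String) (out : Bool) : Prop := out = is_senior_role_alt title
instance (title : String) (out : Bool) : Decidable (Spec_is_senior_role title out) := by unfold Spec_is_senior_role; infer_instance

-- ===== CLAIM (what is proved, stated in full; the proofs are below) =====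
def Claim_equal_is_senior_role : Prop := ∀ (title : String), Dom_is_senior_role title → Spec_is_senior_role title (is_senior_role title)

-- ===== LEMMAS AND PROOFS =====

lemma loopA_iff (t : String) (kws : List String) :
    pvLoopA t kws = true ↔ ∃ kw ∈ kws, PySem.Str.isIn kw t = true := by
  induction kws with
  | nil => simp [pvLoopA]
  | cons kw rest ih =>
      simp only [pvLoopA]
      split_ifs with h
      · exact ⟨fun _ => ⟨kw, List.mem_cons_self, h⟩, fun _ => rfl⟩
      · rw [ih]
        constructor
        · rintro ⟨k, hk, hin⟩
          exact ⟨k, List.mem_cons_of_mem _ hk, hin⟩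
        · rintro ⟨k, hk, hin⟩
          rcases List.mem_cons.mp hk with rfl | hk'
          · exact absurd hin h
          · exact ⟨k, hk', hin⟩

lemma stepB_hit (ch : Char) (cands : List (List Char)) :
    (pvStepB ch cands).1 = true ↔ [ch] ∈ cands := by
  induction cands with
  | nil => simp [pvStepB]
  | cons s rest ih =>
      rcases s with _ | ⟨c0, d⟩
      · simpa [pvStepB] using ih
      · by_cases hc : c0 = ch
        · subst hc
          by_cases hd : d = []
          · subst hd; simp [pvStepB]
          · simp only [pvStepB, beq_self_eq_true, if_true,
              List.isEmpty_iff, hd, if_false]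
            rw [ih]
            simp [List.mem_cons, Ne.symm hd]
        · have : (c0 == ch) = false := by simp [hc]
          simp only [pvStepB, this, Bool.false_eq_true, if_false]
          rw [ih]
          simp [List.mem_cons]
          intro h
          exact absurd h.symm hc

lemma stepB_mem (ch : Char) (cands : List (List Char)) (d : List Char) :
    d ∈ (pvStepB ch cands).2 ↔ (ch :: d) ∈ cands ∧ d ≠ [] := by
  induction cands with
  | nil => simp [pvStepB]
  | cons s rest ih =>
      rcases s with _ | ⟨c0, d0⟩
      · rw [show (pvStepB ch ([] :: rest)) = pvStepB ch rest from rfl, ih]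
        simp
      · by_cases hc : c0 = ch
        · subst hc
          by_cases hd : d0 = []
          · subst hd
            simp only [pvStepB, beq_self_eq_true, if_true, List.isEmpty_nil,
              if_true]
            rw [ih]
            constructor
            · rintro ⟨h, hne⟩
              exact ⟨List.mem_cons_of_mem _ h, hne⟩
            · rintro ⟨h, hne⟩
              rcases List.mem_cons.mp h with h | h
              · injection h with _ h2
                exact absurd h2 hne
              · exact ⟨h, hne⟩
          · simp only [pvStepB, beq_self_eq_true, if_true, List.isEmpty_iff,
              hd, if_false, List.mem_cons]
            rw [ih]
            constructor
            · rintro (rfl | ⟨h, hne⟩)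
              · exact ⟨Or.inl rfl, hd⟩
              · exact ⟨Or.inr h, hne⟩
            · rintro ⟨h | h, hne⟩
              · injection h with _ h2
                exact Or.inl h2
              · exact Or.inr ⟨h, hne⟩
        · have hcb : (c0 == ch) = false := by simp [hc]
          simp only [pvStepB, hcb, Bool.false_eq_true, if_false]
          rw [ih]
          constructor
          · rintro ⟨h, hne⟩
            exact ⟨List.mem_cons_of_mem _ h, hne⟩
          · rintro ⟨h, hne⟩
            rcases List.mem_cons.mp h with h | h
            · exact absurd (by injection h with h1; exact h1.symm) hc
            · exact ⟨h, hne⟩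

lemma kwB_nonempty : ∀ kw ∈ pvKwB, kw ≠ ([] : List Char) := by decide

-- main invariant of B's scan: a match fires iff some keyword occurs in the
-- remaining text or some active suffix is a prefix of the remaining text
lemma runB_iff (s : List Char) :
    ∀ active : List (List Char), (∀ a ∈ active, a ≠ ([] : List Char)) →
      (pvRunB s active = true ↔
        (∃ kw ∈ pvKwB, kw <:+: s) ∨ ∃ a ∈ active, a <+: s) := by
  induction s with
  | nil =>
      intro active hact
      simp only [pvRunB, Bool.false_eq_true, false_iff]
      rintro (⟨kw, hmem, hinf⟩ | ⟨a, hmem, hpre⟩)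
      · exact kwB_nonempty kw hmem (List.eq_nil_of_infix_nil hinf)
      · exact hact a hmem (List.prefix_nil.mp hpre)
  | cons c rest ih =>
      intro active hact
      simp only [pvRunB]
      by_cases hhit : (pvStepB c (pvKwB ++ active)).1 = true
      · simp only [hhit, if_true, true_iff]
        have := (stepB_hit c (pvKwB ++ active)).mp hhit
        rcases List.mem_append.mp this with h | h
        · exact Or.inl ⟨[c], h, ⟨[], rest, rfl⟩⟩
        · exact Or.inr ⟨[c], h, ⟨rest, rfl⟩⟩
      · have hnext : ∀ a ∈ (pvStepB c (pvKwB ++ active)).2, a ≠ ([] : List Char) :=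
          fun a ha => ((stepB_mem c (pvKwB ++ active) a).mp ha).2
        simp only [Bool.not_eq_true] at hhit
        simp only [hhit, Bool.false_eq_true, if_false]
        rw [ih _ hnext]
        constructor
        · rintro (⟨kw, hmem, hinf⟩ | ⟨a, hmem, hpre⟩)
          · exact Or.inl ⟨kw, hmem, hinf.trans (List.suffix_cons c rest).isInfix⟩
          · rcases List.mem_append.mp ((stepB_mem c (pvKwB ++ active) a).mp hmem).1 with h | h
            · exact Or.inl ⟨c :: a, h, (List.cons_prefix_cons.mpr ⟨rfl, hpre⟩).isInfix⟩
            · exact Or.inr ⟨c :: a, h, List.cons_prefix_cons.mpr ⟨rfl, hpre⟩⟩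
        · rintro (⟨kw, hmem, hinf⟩ | ⟨a, hmem, hpre⟩)
          · rcases List.infix_cons_iff.mp hinf with hpre | hinf'
            · -- kw is a prefix of c :: rest; kw nonempty, so kw = c :: d
              match kw, hpre with
              | [], _ => exact absurd rfl (kwB_nonempty _ hmem)
              | k0 :: d, hpre =>
                  obtain ⟨t, ht⟩ := hpre
                  have h1 : k0 = c := by injection ht
                  have h2 : d ++ t = rest := by injection ht
                  by_cases hd : d = []
                  · subst hd
                    exact absurd ((stepB_hit c (pvKwB ++ active)).mpr
                      (List.mem_append_left _ (h1 ▸ hmem))) (by simp [hhit])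
                  · exact Or.inr ⟨d, (stepB_mem c _ _).mpr
                      ⟨List.mem_append_left _ (h1 ▸ hmem), hd⟩, ⟨t, h2⟩⟩
            · exact Or.inl ⟨kw, hmem, hinf'⟩
          · match a, hpre with
            | [], _ => exact absurd rfl (hact _ hmem)
            | a0 :: d, hpre =>
                obtain ⟨t, ht⟩ := hpre
                have h1 : a0 = c := by injection ht
                have h2 : d ++ t = rest := by injection ht
                by_cases hd : d = []
                · subst hd
                  exact absurd ((stepB_hit c (pvKwB ++ active)).mpr
                    (List.mem_append_right _ (h1 ▸ hmem))) (by simp [hhit])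
                · exact Or.inr ⟨d, (stepB_mem c _ _).mpr
                    ⟨List.mem_append_right _ (h1 ▸ hmem), hd⟩, ⟨t, h2⟩⟩

-- each A-keyword begins with some B-keyword, and each B-keyword is an A-keyword
lemma kwA_to_kwB : ∀ kw ∈ pvKwA, ∃ kw' ∈ pvKwB, kw' <+: kw.toList := by decide

lemma kwB_to_kwA : ∀ kw' ∈ pvKwB, ∃ kw ∈ pvKwA, kw.toList = kw' := by decide

-- ===== VERDICT (by name: the statement is the Claim_ definition above) =====
theorem is_senior_role_spec : Claim_equal_is_senior_role := by
  intro title _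
  unfold Spec_is_senior_role is_senior_role is_senior_role_alt
  have hA := loopA_iff (PySem.Str.lower title) pvKwA
  have hB := runB_iff (PySem.Chars.lower title.toList) [] (by simp)
  simp only [List.not_mem_nil, false_and, exists_false, or_false] at hB
  have hiff : (∃ kw ∈ pvKwA, PySem.Str.isIn kw (PySem.Str.lower title) = true) ↔
      (∃ kw' ∈ pvKwB, kw' <:+: PySem.Chars.lower title.toList) := by
    constructor
    · rintro ⟨kw, hmem, hin⟩
      have hinf : kw.toList <:+: PySem.Chars.lower title.toList := by
        have := (PySem.Str.isIn_iff_infix kw (PySem.Str.lower title)).mp hin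
        simpa [PySem.Str.toList_lower] using this
      obtain ⟨kw', hmem', hpre⟩ := kwA_to_kwB kw hmem
      exact ⟨kw', hmem', hpre.isInfix.trans hinf⟩
    · rintro ⟨kw', hmem', hinf⟩
      obtain ⟨kw, hmem, heq⟩ := kwB_to_kwA kw' hmem'
      refine ⟨kw, hmem, ?_⟩
      rw [PySem.Str.isIn_iff_infix, PySem.Str.toList_lower, heq]
      exact hinf
  exact Bool.eq_iff_iff.mpr (hA.trans (hiff.trans hB.symm))
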